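-- pv_equiv track=rewrite | github.com/OneZee23/RipeCode | Task2.py | count_of_circles
-- ===== SOURCE A (Python) =====
-- def count_of_circles(array_points):
--     """
--     Функция нахождения количества окружностей с центром в точке O(0, 0) на которых лежат все заданные точки.
--
--     Основная формула нахождения точки на окружности с центром в точке О(0, 0):
--     x^2 + y^2 <= R^2
--
--     :param array_points: массив с координатами точек
--     :return: количество окружностей
--     """
--     # Задаем словарь для расчета количества окружностей, с ключем - R (радиус окружности) и значением - (x, y)
--     circles = {}
--
--     for coordinate in array_points:
--         x = coordinate["x"]
--         y = coordinate["y"]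
--
--         # Функция pow в python - предназначена для возведения в степень x^y, pow(x, y)
--         r = pow(x, 2) + pow(y, 2)
--         # Создаем пару ключ - радиус, значение - координаты точки (x, y) и в случае если ключ уже существует, добавляем в массив к существующим координатам
--         circles.setdefault(r, []).append(coordinate)
--
--     return len(circles)
-- ===== SOURCE B (Python) =====
-- def count_of_circles(array_points):
--     radii = sorted(c["x"] ** 2 + c["y"] ** 2 for c in array_points)
--     count = 0
--     prev = None
--     for r in radii:
--         if prev is None or r != prev:
--             count += 1
--         prev = r
--     return count
-- ===== Notes on version B (the rewrite author's own statement) =====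
-- stated objective: alternative
-- what changed: Replaces the dict-of-radii grouping (setdefault/append, then len) by computing the squared radii, sorting them, and counting adjacent-distinct runs in one scan.
import Mathlib
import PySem

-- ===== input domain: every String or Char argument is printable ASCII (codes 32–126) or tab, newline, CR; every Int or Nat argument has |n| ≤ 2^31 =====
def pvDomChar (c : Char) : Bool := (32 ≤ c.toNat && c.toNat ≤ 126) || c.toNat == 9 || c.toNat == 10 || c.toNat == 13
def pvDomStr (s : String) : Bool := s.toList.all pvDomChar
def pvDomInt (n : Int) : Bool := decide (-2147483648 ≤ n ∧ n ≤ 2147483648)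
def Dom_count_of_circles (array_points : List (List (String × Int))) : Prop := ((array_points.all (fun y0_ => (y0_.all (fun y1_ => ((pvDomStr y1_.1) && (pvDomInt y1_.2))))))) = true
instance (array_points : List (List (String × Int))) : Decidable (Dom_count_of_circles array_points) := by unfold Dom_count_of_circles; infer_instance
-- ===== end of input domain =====

-- B sorts the squared radii and counts adjacent-distinct runs instead of grouping them in a
-- dict and taking its length; a genuinely different algorithm of similar cost (objective: alternative).

-- coordinate["x"]: Python dict lookup (first match); total form, exact under Pre_ (key present).
-- Shared by both ports because both Pythons read the coordinates identically.
def cocKeyGet (coordinate : List (String × Int)) (k : String) : Int :=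
  (PySem.Dict.mk coordinate).getD k 0

-- ===== PORT A =====
def count_of_circles (array_points : List (List (String × Int))) : Int :=
  let circles : PySem.Dict Int (List (List (String × Int))) :=
    array_points.foldl (fun circles coordinate =>
      let x := cocKeyGet coordinate "x"
      let y := cocKeyGet coordinate "y"
      let r := x ^ 2 + y ^ 2
      circles.modify r [] (· ++ [coordinate])) PySem.Dict.empty
  (circles.size : Int)

-- ===== PORT B =====
def count_of_circles_alt (array_points : List (List (String × Int))) : Int :=
  let radii := PySem.List.sorted
    (array_points.map (fun c => cocKeyGet c "x" ^ 2 + cocKeyGet c "y" ^ 2))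
    (fun r => r) false
  let fin := radii.foldl (fun (st : Int × Option Int) r =>
    (if st.2 = some r then st.1 else st.1 + 1, some r)) (0, none)
  fin.1

-- ===== PRECONDITION & SPEC =====
-- Pre_ excludes exactly the coordinate dicts lacking an "x" or "y" key, on which Python A raises KeyError.
def Pre_count_of_circles (array_points : List (List (String × Int))) : Prop :=
  ∀ c ∈ array_points, (PySem.Dict.mk c).contains "x" = true ∧ (PySem.Dict.mk c).contains "y" = true
instance (array_points : List (List (String × Int))) : Decidable (Pre_count_of_circles array_points) := by unfold Pre_count_of_circles; infer_instance

def pvWitness_count_of_circles : (List (List (String × Int))) :=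
  [[("x", 1), ("y", 2)], [("x", -2), ("y", -1)], [("x", 0), ("y", 0)]]

def Spec_count_of_circles (array_points : List (List (String × Int))) (out : Int) : Prop := out = count_of_circles_alt array_points
instance (array_points : List (List (String × Int))) (out : Int) : Decidable (Spec_count_of_circles array_points out) := by unfold Spec_count_of_circles; infer_instance

-- ===== CLAIM (what is proved, stated in full; the proofs are below) =====
def Claim_equal_count_of_circles : Prop := ∀ (array_points : List (List (String × Int))), Dom_count_of_circles array_points → Pre_count_of_circles array_points → Spec_count_of_circles array_points (count_of_circles array_points)

-- ===== LEMMAS AND PROOFS =====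

-- Counting heads of cons: one new distinct value plus the distinct values of the tail other than it.
theorem coc_cardstep (r : Int) (t : List Int) :
    ((r :: t).toFinset.card : Int) = 1 + ((t.filter (fun y => y ≠ r)).toFinset.card : Int) := by
  have h1 : (t.filter (fun y => y ≠ r)).toFinset = t.toFinset.erase r := by
    ext y; simp [List.mem_toFinset, Finset.mem_erase, and_comm]
  have h2 : insert r t.toFinset = insert r (t.toFinset.erase r) := by
    ext y; by_cases hy : y = r <;> simp [hy]
  rw [List.toFinset_cons, h1, h2, Finset.card_insert_of_notMem (by simp)]
  push_cast; ring

-- The number of distinct elements of a list as PySem.Set length.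
theorem coc_setlen (xs : List Int) : ((PySem.Set.ofList xs).length : Int) = (xs.toFinset.card : Int) := by
  have h1 : (PySem.Set.ofList xs).toFinset = xs.toFinset := by
    ext y; simp [List.mem_toFinset, PySem.Set.mem_ofList]
  have h2 := List.toFinset_card_of_nodup (PySem.Set.nodup_ofList (xs := xs))
  rw [← h1, h2]

-- A's result: the grouping dict gets one key per distinct squared radius.
theorem coc_A_eq_card (array_points : List (List (String × Int))) :
    count_of_circles array_points =
      ((array_points.map (fun c => cocKeyGet c "x" ^ 2 + cocKeyGet c "y" ^ 2)).toFinset.card : Int) := by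
  unfold count_of_circles
  have hk := PySem.Dict.keys_foldl_modify_key (l := array_points)
    (key := fun c => cocKeyGet c "x" ^ 2 + cocKeyGet c "y" ^ 2) (d0 := [])
    (f := fun _ c => (· ++ [c])) (d := (PySem.Dict.empty : PySem.Dict Int (List (List (String × Int)))))
  have hsize : ∀ (d : PySem.Dict Int (List (List (String × Int)))), (d.size : Int) = (d.keys.length : Int) := by
    intro d; simp [PySem.Dict.size, PySem.Dict.keys]
  rw [hsize, hk]
  simp only [PySem.Dict.keys_empty, PySem.Set.update_nil_left]
  exact coc_setlen _

-- B's scan over a ≤-sorted tail, with previous value p below every element, counts the distinct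
-- values different from p.
theorem coc_B_loop (t : List Int) : ∀ (c p : Int), t.Pairwise (· ≤ ·) → (∀ y ∈ t, p ≤ y) →
    (t.foldl (fun (st : Int × Option Int) r =>
      (if st.2 = some r then st.1 else st.1 + 1, some r)) (c, some p)).1
      = c + ((t.filter (fun y => y ≠ p)).toFinset.card : Int) := by
  induction t with
  | nil => intro c p _ _; simp
  | cons r t ih =>
    intro c p hpw hp
    obtain ⟨hr, htpw⟩ := List.pairwise_cons.mp hpw
    simp only [List.foldl_cons]
    by_cases hrp : p = r
    · subst hrp
      rw [if_pos rfl, ih c p htpw hr, List.filter_cons]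
      simp
    · have hlt : p < r := lt_of_le_of_ne (hp r (by simp)) hrp
      rw [if_neg (by simpa using hrp), ih (c+1) r htpw hr]
      have hft : t.filter (fun y => y ≠ p) = t := by
        rw [List.filter_eq_self]
        intro y hy
        have := hr y hy
        simp only [ne_eq, decide_eq_true_eq]
        omega
      rw [List.filter_cons, if_pos (by simp [Ne.symm hrp]), hft, coc_cardstep]
      ring

-- B's whole scan on a ≤-sorted list counts its distinct elements.
theorem coc_B_top (ys : List Int) (h : ys.Pairwise (· ≤ ·)) :
    (ys.foldl (fun (st : Int × Option Int) r =>
      (if st.2 = some r then st.1 else st.1 + 1, some r)) (0, none)).1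
      = (ys.toFinset.card : Int) := by
  cases ys with
  | nil => simp
  | cons r t =>
    obtain ⟨hr, htpw⟩ := List.pairwise_cons.mp h
    simp only [List.foldl_cons, reduceCtorEq, if_false, zero_add]
    rw [coc_cardstep]
    rw [coc_B_loop t 1 r htpw hr]

theorem coc_B_eq_card (array_points : List (List (String × Int))) :
    count_of_circles_alt array_points =
      ((array_points.map (fun c => cocKeyGet c "x" ^ 2 + cocKeyGet c "y" ^ 2)).toFinset.card : Int) := by
  unfold count_of_circles_alt
  set xs := array_points.map (fun c => cocKeyGet c "x" ^ 2 + cocKeyGet c "y" ^ 2) with hxs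
  have hperm : (PySem.List.sorted xs (fun r => r) false).Perm xs := PySem.List.sorted_perm ..
  have hpw : (PySem.List.sorted xs (fun r => r) false).Pairwise (· ≤ ·) := by
    simpa using PySem.List.sorted_pairwise (xs := xs) (key := fun r => r)
  rw [coc_B_top _ hpw, List.toFinset_eq_of_perm _ _ hperm]

-- ===== VERDICT (by name: the statement is the Claim_ definition above) =====
theorem count_of_circles_spec : Claim_equal_count_of_circles := by
  intro aps _ _
  unfold Spec_count_of_circles
  rw [coc_A_eq_card, coc_B_eq_card]
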